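-- pv_equiv track=rewrite | github.com/kherrera1517/Python | CS5/Black/hw8pr2.py | dollarify
-- ===== SOURCE A (Python) =====
-- PUNCTUATION = [".", "!", "?"]
--
-- def dollarify(wordList, k):
--     if wordList == [] or k == 0:
--         return wordList
--     returnList = []
--     ind = 0 #keeps track of the beginning of a sentence
--     for i in range(len(wordList)):
--         if wordList[i][-1] in PUNCTUATION:
--             returnList += ['$']*k + wordList[ind:i+1]
--             ind = i+1
--     return returnList
-- ===== SOURCE B (Python) =====
-- PUNCTUATION = [".", "!", "?"]
--
-- def dollarify(wordList, k):
--     if wordList == [] or k == 0: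
--         return wordList
--     # phase 1: partition the words into completed sentences (a leftover
--     # partial sentence at the end is discarded, as in the original)
--     sentences = []
--     buf = []
--     for w in wordList:
--         buf.append(w)
--         if w[-1] in PUNCTUATION:
--             sentences.append(buf)
--             buf = []
--     # phase 2: expand each sentence with k leading dollar signs
--     result = []
--     for s in sentences:
--         result.extend(['$'] * k + s)
--     return result
-- ===== Notes on version B (the rewrite author's own statement) =====
-- stated objective: alternative
-- what changed: B replaces A's boundary-index bookkeeping with slicing of the original list by a two-phase scheme: one pass partitions the words into completed-sentence sublists via a running buffer, a second pass concatenates ['$']*k before each sentence.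
import Mathlib
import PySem

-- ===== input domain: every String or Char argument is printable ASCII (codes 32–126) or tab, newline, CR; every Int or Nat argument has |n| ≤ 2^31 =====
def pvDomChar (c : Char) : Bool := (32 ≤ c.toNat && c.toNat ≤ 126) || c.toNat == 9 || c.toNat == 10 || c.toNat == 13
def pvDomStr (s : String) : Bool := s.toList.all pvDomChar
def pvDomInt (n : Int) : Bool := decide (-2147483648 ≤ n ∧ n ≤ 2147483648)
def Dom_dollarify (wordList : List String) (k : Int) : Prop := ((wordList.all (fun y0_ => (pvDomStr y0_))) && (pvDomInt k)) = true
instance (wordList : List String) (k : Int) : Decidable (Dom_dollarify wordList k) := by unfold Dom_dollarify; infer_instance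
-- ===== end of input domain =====

-- B restructures A: instead of tracking sentence-start indices and slicing the
-- original list, B partitions the words into completed-sentence sublists in one
-- pass and then expands each with k dollars in a second pass (objective: alternative).

-- ===== PORT A =====
def dollarify (wordList : List String) (k : Int) : List String :=
  if wordList = [] ∨ k = 0 then wordList
  else
    -- returnList, ind folded over for i in range(len(wordList))
    (((PySem.List.pyRange 0 (wordList.length : Int) 1).foldl
      (fun (st : List String × Int) i =>
        match PySem.Str.pyGet? (PySem.List.pyGetD wordList i "") (-1) with
        | some c =>
            if c ∈ ['.', '!', '?'] then
              (st.1 ++ (List.replicate k.toNat "$" ++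
                 PySem.List.slice wordList (some st.2) (some (i + 1))), i + 1)
            else st
        | none => st)  -- empty word: Python raises IndexError here (outside Pre_)
      ([], 0)) : List String × Int).1

-- ===== PORT B =====
def dollarify_alt (wordList : List String) (k : Int) : List String :=
  if wordList = [] ∨ k = 0 then wordList
  else
    -- phase 1: sentences, buf
    let st := wordList.foldl
      (fun (st : List (List String) × List String) w =>
        match PySem.Str.pyGet? w (-1) with
        | some c =>
            if c ∈ ['.', '!', '?'] then (st.1 ++ [st.2 ++ [w]], [])
            else (st.1, st.2 ++ [w])
        | none => (st.1, st.2 ++ [w]))  -- empty word: Python raises IndexError here (outside Pre_)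
      ([], [])
    -- phase 2: expand every sentence with k dollars
    st.1.foldl (fun acc s => acc ++ (List.replicate k.toNat "$" ++ s)) []

-- ===== PRECONDITION & SPEC =====
-- Pre_ excludes exactly the inputs on which A raises IndexError (an empty-string
-- word reached past the guard); B raises there too.
def Pre_dollarify (wordList : List String) (k : Int) : Prop :=
  wordList = [] ∨ k = 0 ∨ ∀ w ∈ wordList, w ≠ ""
instance (wordList : List String) (k : Int) : Decidable (Pre_dollarify wordList k) := by
  unfold Pre_dollarify; infer_instance
def pvWitness_dollarify : List String × Int := (["hi", "there."], 2)

def Spec_dollarify (wordList : List String) (k : Int) (out : List String) : Prop := out = dollarify_alt wordList k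
instance (wordList : List String) (k : Int) (out : List String) : Decidable (Spec_dollarify wordList k out) := by unfold Spec_dollarify; infer_instance

-- ===== CLAIM (what is proved, stated in full; the proofs are below) =====
def Claim_equal_dollarify : Prop := ∀ (wordList : List String) (k : Int), Dom_dollarify wordList k → Pre_dollarify wordList k → Spec_dollarify wordList k (dollarify wordList k)

-- ===== LEMMAS AND PROOFS =====

-- A's loop step and B's loop step, abbreviated for the proofs
def pvStepA (full : List String) (rep : List String) : List String × Int → Int → List String × Int :=
  fun st i =>
    match PySem.Str.pyGet? (PySem.List.pyGetD full i "") (-1) with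
    | some c =>
        if c ∈ ['.', '!', '?'] then
          (st.1 ++ (rep ++ PySem.List.slice full (some st.2) (some (i + 1))), i + 1)
        else st
    | none => st

def pvStepB : List (List String) × List String → String → List (List String) × List String :=
  fun st w =>
    match PySem.Str.pyGet? w (-1) with
    | some c =>
        if c ∈ ['.', '!', '?'] then (st.1 ++ [st.2 ++ [w]], [])
        else (st.1, st.2 ++ [w])
    | none => (st.1, st.2 ++ [w])

-- slice full ind (j+1) = slice full ind j ++ [full[j]]  for ind ≤ j < len
theorem pv_slice_succ (full : List String) (ind j : Nat) (hij : ind ≤ j) (hj : j < full.length) :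
    PySem.List.slice full (some ((j : Int) + 1)) (some ((j : Int) + 1)) = [] ∧
    PySem.List.slice full (some (ind : Int)) (some ((j : Int) + 1))
      = PySem.List.slice full (some (ind : Int)) (some (j : Int)) ++ [full[j]] := by
  constructor
  · have : ((j : Int) + 1) = ((j + 1 : Nat) : Int) := by push_cast; ring
    rw [this, PySem.List.slice_natCast]
    simp
  · have h1 : ((j : Int) + 1) = ((j + 1 : Nat) : Int) := by push_cast; ring
    rw [h1, PySem.List.slice_natCast, PySem.List.slice_natCast]
    have h2 : j + 1 - ind = (j - ind) + 1 := by omega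
    rw [h2, List.take_add_one]
    congr 1
    have : (full.drop ind)[j - ind]? = full[j]? := by
      rw [List.getElem?_drop]; congr 1; omega
    rw [this, List.getElem?_eq_getElem hj]
    simp

-- core invariant: A's index/slice fold equals the flatMap-expansion of B's partition fold
theorem pv_main (rep : List String) :
    ∀ (tail full : List String) (j ind : Nat) (S : List (List String)),
    full.drop j = tail → ind ≤ j →
    ((PySem.List.pyRange (j : Int) (full.length : Int) 1).foldl (pvStepA full rep)
        (S.flatMap (fun s => rep ++ s), (ind : Int))).1
      = ((tail.foldl pvStepB
            (S, PySem.List.slice full (some (ind : Int)) (some (j : Int)))).1).flatMap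
          (fun s => rep ++ s) := by
  intro tail
  induction tail with
  | nil =>
      intro full j ind S hdrop hij
      have hj : full.length ≤ j := by
        by_contra h
        have := List.drop_eq_nil_iff.mp hdrop
        omega
      rw [PySem.List.pyRange_one_eq_nil (by exact_mod_cast hj)]
      simp
  | cons w rest ih =>
      intro full j ind S hdrop hij
      have hj : j < full.length := by
        by_contra h
        rw [List.drop_eq_nil_of_le (by omega)] at hdrop
        simp at hdrop
      have hw : full[j] = w := by
        have h0 : (full.drop j)[0]'(by simp [hdrop]) = w := by simp [hdrop]
        rw [List.getElem_drop] at h0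
        simpa using h0
      have hrest : full.drop (j + 1) = rest := by
        have : full.drop (j + 1) = (full.drop j).drop 1 := by
          rw [List.drop_drop]
        rw [this, hdrop]; simp
      rw [PySem.List.pyRange_one_cons (by exact_mod_cast hj)]
      rw [List.foldl_cons, List.foldl_cons]
      have hget : PySem.List.pyGetD full (j : Int) "" = w := by
        rw [PySem.List.pyGetD_natCast]
        rw [List.getD_eq_getElem?_getD, List.getElem?_eq_getElem hj, hw]
        rfl
      obtain ⟨hsl0, hsl1⟩ := pv_slice_succ full ind j hij hj
      show (_ : List String × Int).1 = _
      rw [pvStepA, pvStepB]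
      simp only [hget]
      have h1 : ((j : Int) + 1) = ((j + 1 : Nat) : Int) := by push_cast; ring
      cases hc : PySem.Str.pyGet? w (-1) with
      | none =>
          rw [h1] at hsl1
          have := ih full (j + 1) ind S hrest (by omega)
          rw [hsl1, hw] at this
          exact this
      | some c =>
          by_cases hmem : c ∈ ['.', '!', '?']
          · simp only [if_pos hmem]
            have := ih full (j + 1) (j + 1)
              (S ++ [PySem.List.slice full (some (ind : Int)) (some (j : Int)) ++ [w]]) hrest (le_refl _)
            rw [show PySem.List.slice full (some ((j + 1 : Nat) : Int)) (some ((j + 1 : Nat) : Int)) = [] by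
              rw [PySem.List.slice_natCast]; simp] at this
            rw [h1] at hsl1
            rw [h1, hsl1, hw]
            rw [List.flatMap_append] at this
            simpa [List.append_assoc] using this
          · simp only [if_neg hmem]
            have := ih full (j + 1) ind S hrest (by omega)
            rw [h1] at hsl1
            rw [hsl1, hw] at this
            exact this

-- ===== VERDICT (by name: the statement is the Claim_ definition above) =====
theorem dollarify_spec : Claim_equal_dollarify := by
  intro wordList k _ _
  unfold Spec_dollarify dollarify dollarify_alt
  by_cases hg : wordList = [] ∨ k = 0
  · simp [hg]
  · simp only [if_neg hg]
    have hmain := pv_main (List.replicate k.toNat "$") wordList wordList 0 0 [] (by simp) (le_refl _)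
    simp only [Nat.cast_zero, List.flatMap_nil] at hmain
    rw [show PySem.List.slice wordList (some (0 : Int)) (some (0 : Int)) = [] by
      rw [show ((0:Int)) = ((0:Nat):Int) by simp, PySem.List.slice_natCast]; simp] at hmain
    rw [PySem.List.foldl_append_eq_flatMap]
    simp only [List.nil_append]
    exact hmain
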